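-- pv_equiv track=rewrite | github.com/AmberLee2427/Ghost | src/discord/utils.py | check_keyword_trigger
-- ===== SOURCE A (Python) =====
-- def check_keyword_trigger(content, triggers):
--     """
--     Checks for trigger words, ignoring them if they are preceded by '!'.
--     """
--     content_lower = content.lower()
--     for trigger in triggers:
--         start_index = 0
--         while True:
--             index = content_lower.find(trigger, start_index)
--             if index == -1:
--                 break  # Trigger not found in the rest of the string.
--
--             if index > 0 and content_lower[index - 1] == '!':
--                 # This is an escaped trigger. Continue searching from after this point.
--                 start_index = index + len(trigger)
--                 continue
--             else:
--                 # A valid, un-escaped trigger was found.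
--                 return True
--     return False
-- ===== SOURCE B (Python) =====
-- def check_keyword_trigger(content, triggers):
--     """
--     Checks for trigger words, ignoring them if they are preceded by '!'.
--
--     Mask out every escaped occurrence ('!' + trigger) of a trigger, then do a
--     plain substring test.  The mask is a NUL character (it can never occur in a
--     trigger), so masking cannot splice the surrounding text into a new match.
--     """
--     c = content.lower()
--     return any(t in c.replace('!' + t, '\0') for t in triggers)
-- ===== Notes on version B (the rewrite author's own statement) =====
-- stated objective: simpler
-- what changed: A runs a hand-written find/resume loop per trigger with explicit index arithmetic to skip escaped matches; B masks every escaped occurrence with one str.replace per trigger and then does a plain substring test. Pre_ excludes only inputs where some trigger t itself contains the escape character '!' and its escaped form '!'+t actually occurs in the lowercased content: there the escape convention is self-referential and A's value (counting an occurrence that overlaps an escaped one) and B's (masking the escaped occurrence first) are both defensible.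
-- outside the precondition, e.g. on check_keyword_trigger('a!a!a', ['a!a']): A returns True, B returns False
import Mathlib
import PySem

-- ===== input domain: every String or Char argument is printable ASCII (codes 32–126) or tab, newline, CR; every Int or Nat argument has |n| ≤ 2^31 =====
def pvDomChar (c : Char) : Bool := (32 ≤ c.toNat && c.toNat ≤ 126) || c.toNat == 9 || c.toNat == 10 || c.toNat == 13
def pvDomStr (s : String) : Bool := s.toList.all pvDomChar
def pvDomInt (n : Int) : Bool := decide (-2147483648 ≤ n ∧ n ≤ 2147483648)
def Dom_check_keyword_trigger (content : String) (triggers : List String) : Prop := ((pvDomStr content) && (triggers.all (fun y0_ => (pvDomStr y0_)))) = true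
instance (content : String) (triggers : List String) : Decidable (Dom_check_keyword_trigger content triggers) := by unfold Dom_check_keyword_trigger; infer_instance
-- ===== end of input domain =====

-- B replaces A's hand-written find/resume loop per trigger by masking every escaped
-- occurrence '!' + trigger with a NUL filler (str.replace) and then doing a plain
-- substring test; same cost, a much plainer program.

-- ===== PORT A =====
-- A's inner `while True` loop for one trigger: repeated find with a resume index.
-- The fuel guard only makes the recursion total (each continuing iteration strictly
-- increases the start index, so `c.length + 2` iterations always suffice).
def ckLoopA (c t : List Char) (s : Int) : Nat → Bool
  | 0 => false
  | fuel + 1 =>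
    let idx := PySem.Chars.findFrom c t s none
    if idx = -1 then false
    else if 0 < idx ∧ PySem.List.pyGet? c (idx - 1) = some '!' then
      ckLoopA c t (idx + t.length) fuel
    else true

def check_keyword_trigger (content : String) (triggers : List String) : Bool :=
  let c := PySem.Chars.lower content.toList
  triggers.any (fun trigger => ckLoopA c trigger.toList 0 (c.length + 2))

-- ===== PORT B =====
-- Source B: `any(t in c.replace('!' + t, '\0') for t in triggers)`
def check_keyword_trigger_alt (content : String) (triggers : List String) : Bool :=
  let c := PySem.Chars.lower content.toList
  triggers.any (fun t =>
    PySem.Chars.isIn t.toList (PySem.Chars.replace c ('!' :: t.toList) ['\x00']))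

-- ===== PRECONDITION & SPEC =====
-- Pre_ excludes inputs where some trigger itself contains the escape character '!'
-- and its escaped form '!' + trigger actually occurs in the lowercased content: there
-- the escaping convention is self-referential and A's value (counting an occurrence
-- that overlaps an escaped one) and B's (masking the escaped occurrence first) are
-- both defensible.
def Pre_check_keyword_trigger (content : String) (triggers : List String) : Prop :=
  ∀ t ∈ triggers, '!' ∉ t.toList ∨ ¬ ('!' :: t.toList) <:+: PySem.Chars.lower content.toList
instance (content : String) (triggers : List String) : Decidable (Pre_check_keyword_trigger content triggers) := by unfold Pre_check_keyword_trigger; infer_instance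

def pvWitness_check_keyword_trigger : String × List String := ("Hello gHost", ["ghost", "cat"])

def Spec_check_keyword_trigger (content : String) (triggers : List String) (out : Bool) : Prop := out = check_keyword_trigger_alt content triggers
instance (content : String) (triggers : List String) (out : Bool) : Decidable (Spec_check_keyword_trigger content triggers out) := by unfold Spec_check_keyword_trigger; infer_instance

-- ===== CLAIM (what is proved, stated in full; the proofs are below) =====
def Claim_equal_check_keyword_trigger : Prop := ∀ (content : String) (triggers : List String), Dom_check_keyword_trigger content triggers → Pre_check_keyword_trigger content triggers → Spec_check_keyword_trigger content triggers (check_keyword_trigger content triggers)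

-- ===== LEMMAS AND PROOFS =====

-- `procRep t l` = what B's `l.replace('!' + t, '\0')` produces, as a structural recursion.
def procRep (t : List Char) : List Char → List Char
  | [] => []
  | ch :: l =>
    if ('!' :: t).isPrefixOf (ch :: l) then '\x00' :: procRep t (List.drop t.length l)
    else ch :: procRep t l
termination_by l => l.length
decreasing_by
  · simp only [List.length_cons, List.length_drop]; omega
  · simp

-- Reference process both sides are reduced to: scan left to right; an escaped
-- occurrence is consumed wholesale, an unescaped occurrence returns true.
def Rspec (t : List Char) : List Char → Bool
  | [] => false
  | ch :: l =>
    if ('!' :: t).isPrefixOf (ch :: l) then Rspec t (List.drop t.length l)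
    else if t.isPrefixOf (ch :: l) then true
    else Rspec t l
termination_by l => l.length
decreasing_by
  · simp only [List.length_cons, List.length_drop]; omega
  · simp

lemma go_eq (t : List Char) : ∀ (fuel : Nat) (l acc : List Char), l.length ≤ fuel →
    PySem.Chars.replace.go ('!' :: t) ['\x00'] fuel l acc = acc.reverse ++ procRep t l := by
  intro fuel
  induction fuel with
  | zero =>
    intro l acc h
    have : l = [] := List.length_eq_zero_iff.mp (Nat.le_zero.mp h)
    subst this
    simp [PySem.Chars.replace.go, procRep]
  | succ fuel ih =>
    intro l acc h
    cases l with
    | nil => simp [PySem.Chars.replace.go, procRep]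
    | cons ch l =>
      simp only [List.length_cons, Nat.add_le_add_iff_right] at h
      by_cases hp : ('!' :: t).isPrefixOf (ch :: l) = true
      · have hlen : (List.drop t.length l).length ≤ fuel := by
          rw [List.length_drop]; omega
        simp only [PySem.Chars.replace.go, hp, if_pos, List.length_cons, List.drop_succ_cons]
        rw [ih (List.drop t.length l) (['\x00'].reverse ++ acc) hlen]
        simp [procRep, hp]
      · simp only [PySem.Chars.replace.go, hp, if_neg, Bool.false_eq_true, not_false_iff]
        rw [ih l (ch :: acc) h]
        simp [procRep, hp]

lemma replace_eq (t c : List Char) :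
    PySem.Chars.replace c ('!' :: t) ['\x00'] = procRep t c := by
  rw [PySem.Chars.replace]
  simp only [List.isEmpty_cons, Bool.false_eq_true, if_false]
  simpa using go_eq t c.length c [] le_rfl

lemma isIn_iff (t s : List Char) : PySem.Chars.isIn t s = true ↔ t <:+: s := by
  rw [PySem.Chars.isIn, bne_iff_ne, ne_eq, ← PySem.Chars.find_ne_neg_one_iff]

-- the first k characters of `procRep t l` are those of l, unless a replacement
-- (an occurrence of '!'::t) started among the first k positions of l
lemma take_procRep (t : List Char) : ∀ (n : Nat) (l : List Char), l.length ≤ n → ∀ (k : Nat),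
    (procRep t l).take k = l.take k ∨
      ('\x00' ∈ (procRep t l).take k ∧ ∃ j < k, ('!' :: t) <+: l.drop j) := by
  intro n
  induction n with
  | zero =>
    intro l h k
    have : l = [] := List.length_eq_zero_iff.mp (Nat.le_zero.mp h)
    subst this; left; simp [procRep]
  | succ n ih =>
    intro l h k
    cases l with
    | nil => left; simp [procRep]
    | cons ch l =>
      simp only [List.length_cons, Nat.add_le_add_iff_right] at h
      by_cases hp : ('!' :: t).isPrefixOf (ch :: l) = true
      · cases k with
        | zero => left; simp
        | succ k =>
          right
          refine ⟨by simp [procRep, hp], 0, by omega, ?_⟩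
          simpa using List.isPrefixOf_iff_prefix.mp hp
      · cases k with
        | zero => left; simp
        | succ k =>
          have hstep : procRep t (ch :: l) = ch :: procRep t l := by
            simp [procRep, hp]
          rcases ih l h k with heq | ⟨hmem, j, hj, hpre⟩
          · left; simp [hstep, heq]
          · right
            refine ⟨by simp [hstep]; exact Or.inr hmem, j + 1, by omega, ?_⟩
            simpa [List.drop_succ_cons] using hpre

-- core of the B side: t occurs in the masked string iff the reference scan fires
lemma infix_procRep (t : List Char) (ht : t ≠ []) (hb : '!' ∉ t) (hn : '\x00' ∉ t) :
    ∀ (n : Nat) (l : List Char), l.length ≤ n → (t <:+: procRep t l ↔ Rspec t l = true) := by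
  intro n
  induction n with
  | zero =>
    intro l h
    have : l = [] := List.length_eq_zero_iff.mp (Nat.le_zero.mp h)
    subst this
    simp [procRep, Rspec, List.infix_nil, ht]
  | succ n ih =>
    intro l h
    cases l with
    | nil => simp [procRep, Rspec, List.infix_nil, ht]
    | cons ch l =>
      simp only [List.length_cons, Nat.add_le_add_iff_right] at h
      obtain ⟨t0, t', rfl⟩ : ∃ t0 t', t = t0 :: t' := by
        cases t with
        | nil => exact absurd rfl ht
        | cons a b => exact ⟨a, b, rfl⟩
      by_cases hp : ('!' :: t0 :: t').isPrefixOf (ch :: l) = true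
      · have hstep : procRep (t0 :: t') (ch :: l)
            = '\x00' :: procRep (t0 :: t') (List.drop (t0 :: t').length l) := by
          simp [procRep, hp]
        have hR : Rspec (t0 :: t') (ch :: l)
            = Rspec (t0 :: t') (List.drop (t0 :: t').length l) := by
          simp [Rspec, hp]
        rw [hstep, hR, List.infix_cons_iff]
        have hhead : ¬ (t0 :: t') <+: '\x00' :: procRep (t0 :: t') (List.drop (t0 :: t').length l) := by
          intro hcon
          rw [List.cons_prefix_cons] at hcon
          exact hn (hcon.1 ▸ List.mem_cons_self)
        have hlen : (List.drop (t0 :: t').length l).length ≤ n := by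
          rw [List.length_drop]; omega
        rw [ih _ hlen]
        exact or_iff_right hhead
      · have hstep : procRep (t0 :: t') (ch :: l) = ch :: procRep (t0 :: t') l := by
          simp [procRep, hp]
        rw [hstep, List.infix_cons_iff]
        by_cases h2 : (t0 :: t').isPrefixOf (ch :: l) = true
        · -- unescaped occurrence right here: both sides are true
          have hR : Rspec (t0 :: t') (ch :: l) = true := by
            simp [Rspec, hp, h2]
          have hpre2 := List.isPrefixOf_iff_prefix.mp h2
          rw [List.cons_prefix_cons] at hpre2
          obtain ⟨rfl, ht'⟩ := hpre2
          have ht'take : t' = List.take t'.length l := List.prefix_iff_eq_take.mp ht'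
          have hprefB : t' <+: procRep (t0 :: t') l := by
            rcases take_procRep (t0 :: t') l.length l le_rfl t'.length with heq | ⟨_, j, hj, hpre⟩
            · exact List.prefix_iff_eq_take.mpr (ht'take.trans heq.symm)
            · exfalso
              have hjl : getElem? l j = some '!' := by
                rcases hpre with ⟨r, hr⟩
                have hh : (List.drop j l).head? = some '!' := by rw [← hr]; rfl
                rwa [List.head?_drop] at hh
              have hj2 : getElem? t' j = some '!' := by
                rw [ht'take, List.getElem?_take, if_pos hj, hjl]
              have : '!' ∈ t' := List.mem_of_getElem? hj2
              exact hb (List.mem_cons_of_mem _ this)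
          have : (t0 :: t') <+: t0 :: procRep (t0 :: t') l := by
            rw [List.cons_prefix_cons]; exact ⟨rfl, hprefB⟩
          simp [hR, this]
        · have hR : Rspec (t0 :: t') (ch :: l) = Rspec (t0 :: t') l := by
            simp [Rspec, hp, h2]
          have hhead : ¬ (t0 :: t') <+: ch :: procRep (t0 :: t') l := by
            intro hcon
            rw [List.cons_prefix_cons] at hcon
            obtain ⟨rfl, ht'⟩ := hcon
            have ht'take : t' = List.take t'.length (procRep (t0 :: t') l) :=
              List.prefix_iff_eq_take.mp ht'
            rcases take_procRep (t0 :: t') l.length l le_rfl t'.length with heq | ⟨hmem, _⟩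
            · have hpl : t' <+: l := List.prefix_iff_eq_take.mpr (ht'take.trans heq)
              exact h2 (List.isPrefixOf_iff_prefix.mpr (List.cons_prefix_cons.mpr ⟨rfl, hpl⟩))
            · rw [← ht'take] at hmem
              exact hn (List.mem_cons_of_mem _ hmem)
          rw [hR, ih l h]
          simp [hhead]

-- no occurrence of t anywhere ⇒ the reference scan never fires
lemma R_dead (t : List Char) : ∀ (n : Nat) (l : List Char), l.length ≤ n →
    (∀ j : Nat, ¬ t <+: List.drop j l) → Rspec t l = false := by
  intro n
  induction n with
  | zero =>
    intro l h _
    have : l = [] := List.length_eq_zero_iff.mp (Nat.le_zero.mp h)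
    subst this; simp [Rspec]
  | succ n ih =>
    intro l h hocc
    cases l with
    | nil => simp [Rspec]
    | cons ch l =>
      simp only [List.length_cons, Nat.add_le_add_iff_right] at h
      have hp : ¬ ('!' :: t).isPrefixOf (ch :: l) = true := by
        intro hcon
        have := List.isPrefixOf_iff_prefix.mp hcon
        rw [List.cons_prefix_cons] at this
        exact hocc 1 (by simpa [List.drop_succ_cons] using this.2)
      have h2 : ¬ t.isPrefixOf (ch :: l) = true := by
        intro hcon
        exact hocc 0 (by simpa using List.isPrefixOf_iff_prefix.mp hcon)
      have hR : Rspec t (ch :: l) = Rspec t l := by simp [Rspec, hp, h2]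
      rw [hR]
      exact ih l h (fun j => by simpa [List.drop_succ_cons] using hocc (j + 1))

-- stepping over d positions carrying no occurrence of t at offsets 0..d
lemma R_skip (t : List Char) : ∀ (d : Nat) (l : List Char),
    (∀ j : Nat, j ≤ d → ¬ t <+: List.drop j l) → Rspec t l = Rspec t (List.drop d l) := by
  intro d
  induction d with
  | zero => intro l _; simp
  | succ d ih =>
    intro l hocc
    cases l with
    | nil => simp
    | cons ch l =>
      have hp : ¬ ('!' :: t).isPrefixOf (ch :: l) = true := by
        intro hcon
        have := List.isPrefixOf_iff_prefix.mp hcon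
        rw [List.cons_prefix_cons] at this
        exact hocc 1 (by omega) (by simpa [List.drop_succ_cons] using this.2)
      have h2 : ¬ t.isPrefixOf (ch :: l) = true := by
        intro hcon
        exact hocc 0 (by omega) (by simpa using List.isPrefixOf_iff_prefix.mp hcon)
      have hR : Rspec t (ch :: l) = Rspec t l := by simp [Rspec, hp, h2]
      rw [hR, List.drop_succ_cons]
      exact ih l (fun j hj => by simpa [List.drop_succ_cons] using hocc (j + 1) (by omega))

-- two nonempty prefixes of the same list have the same head
lemma heads_eq_of_prefix {a b : Char} {l1 l2 L : List Char}
    (h1 : a :: l1 <+: L) (h2 : b :: l2 <+: L) : a = b := by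
  rcases List.prefix_or_prefix_of_prefix h1 h2 with h | h <;>
    · rw [List.cons_prefix_cons] at h
      simp [h.1]

-- main A-side lemma: A's find/resume loop equals the reference scan of the suffix,
-- provided the scan position is 0 or not preceded by '!'
lemma A_eq_R (c t : List Char) (ht : t ≠ []) (hb : '!' ∉ t) :
    ∀ (k s fuel : Nat), k = c.length - s → s ≤ c.length → c.length + 2 ≤ s + fuel →
      (s = 0 ∨ getElem? c (s - 1) ≠ some '!') →
      ckLoopA c t (s : Int) fuel = Rspec t (List.drop s c) := by
  intro k
  induction k using Nat.strong_induction_on with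
  | _ k ih =>
    intro s fuel hk hs hfuel hinv
    obtain ⟨f, rfl⟩ : ∃ f, fuel = f + 1 := ⟨fuel - 1, by omega⟩
    have htlen : 1 ≤ t.length := by
      cases t with
      | nil => exact absurd rfl ht
      | cons x xs => simp
    by_cases hocc : t <:+: List.drop s c
    · have hidx : PySem.Chars.findFrom c t (s : Int) none ≠ -1 := by
        rw [Ne, PySem.Chars.findFrom_natCast_eq_neg_one_iff c t s hs]
        simpa using hocc
      obtain ⟨hsle, hpre, hmin⟩ := PySem.Chars.findFrom_natCast_spec c t s hs hidx
      set jI := PySem.Chars.findFrom c t (s : Int) none with hjIdef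
      have hjI0 : (0 : Int) ≤ jI := le_trans (by positivity) hsle
      set j := jI.toNat with hjdef
      have hfind : PySem.Chars.findFrom c t (s : Int) none = (j : Int) := by
        rw [← hjIdef]; omega
      have hsj : s ≤ j := by omega
      have hjlen : j + t.length ≤ c.length := by
        have h1 : t.length ≤ (List.drop j c).length := hpre.length_le
        rw [List.length_drop] at h1
        omega
      -- characters inside the occurrence are characters of t
      have hchar : ∀ i : Nat, i < t.length → getElem? c (j + i) = getElem? t i := by
        intro i hi
        have htake := List.prefix_iff_eq_take.mp hpre
        have hh : getElem? t i = getElem? (List.take t.length (List.drop j c)) i := by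
          rw [← htake]
        rw [List.getElem?_take, if_pos hi, List.getElem?_drop] at hh
        exact hh.symm
      by_cases hesc : 0 < j ∧ PySem.List.pyGet? c ((j : Int) - 1) = some '!'
      · -- escaped occurrence: both sides continue past it
        have h1j : 1 ≤ j := hesc.1
        have hlt : j - 1 < c.length := by omega
        have hgj : getElem? c (j - 1) = some '!' := by
          have h2 := hesc.2
          rw [show (j : Int) - 1 = ((j - 1 : Nat) : Int) by omega,
            PySem.List.pyGet?_natCast] at h2
          exact h2
        have hsj1 : s + 1 ≤ j := by
          rcases hinv with rfl | hne
          · omega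
          · by_contra hcon
            have hse : s = j := by omega
            exact hne (hse ▸ hgj)
        -- A's step
        have hescI : (0 : Int) < jI ∧ PySem.List.pyGet? c (jI - 1) = some '!' := by
          rw [hjIdef, hfind]
          exact ⟨by exact_mod_cast hesc.1, hesc.2⟩
        have hA : ckLoopA c t (s : Int) (f + 1) = ckLoopA c t (((j + t.length : Nat) : Int)) f := by
          simp only [ckLoopA, hfind]
          rw [if_neg (by omega), if_pos (by rw [← hfind]; exact hescI)]
          congr 1
        -- R's side: skip to j-1, consume the escaped occurrence
        have hskip : Rspec t (List.drop s c) = Rspec t (List.drop (j - 1) c) := by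
          have h := R_skip t (j - 1 - s) (List.drop s c) (by
            intro j' hj'
            rw [List.drop_drop]
            exact hmin (s + j') (by omega) (by omega))
          rw [List.drop_drop, show s + (j - 1 - s) = j - 1 by omega] at h
          exact h
        have hdrop1 : List.drop (j - 1) c = '!' :: List.drop j c := by
          rw [List.drop_eq_getElem_cons hlt, show j - 1 + 1 = j by omega]
          congr 1
          have h1 := List.getElem?_eq_getElem hlt
          rw [hgj] at h1
          exact (Option.some_inj.mp h1).symm
        have hguard : ('!' :: t).isPrefixOf ('!' :: List.drop j c) = true := by
          rw [List.isPrefixOf_iff_prefix, List.cons_prefix_cons]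
          exact ⟨rfl, hpre⟩
        have hR : Rspec t (List.drop (j - 1) c) = Rspec t (List.drop (j + t.length) c) := by
          rw [hdrop1]
          simp only [Rspec, hguard, if_pos]
          rw [List.drop_drop]
        -- recurse at j + |t|; the character before it is the last character of t, not '!'
        have hlast : getElem? c (j + t.length - 1) ≠ some '!' := by
          have hc1 := hchar (t.length - 1) (by omega)
          rw [show j + (t.length - 1) = j + t.length - 1 by omega] at hc1
          rw [hc1]
          intro hcon
          exact hb (List.mem_of_getElem? hcon)
        rw [hA, hskip, hR]
        exact ih (c.length - (j + t.length)) (by omega) (j + t.length) f rfl (by omega)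
          (by omega) (Or.inr hlast)
      · -- unescaped occurrence: both sides return true
        have hescI : ¬ ((0 : Int) < jI ∧ PySem.List.pyGet? c (jI - 1) = some '!') := by
          rw [hjIdef, hfind]
          intro hcon
          exact hesc ⟨by exact_mod_cast hcon.1, hcon.2⟩
        have hA : ckLoopA c t (s : Int) (f + 1) = true := by
          simp only [ckLoopA, hfind]
          rw [if_neg (by omega), if_neg (by rw [← hfind]; exact hescI)]
        -- at position j the guards of Rspec fire the 'true' branch
        have hjc : j < c.length := by omega
        obtain ⟨chj, hchj⟩ : ∃ ch, getElem? c j = some ch := ⟨_, List.getElem?_eq_getElem hjc⟩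
        have hdropj : List.drop j c = chj :: List.drop (j + 1) c := by
          rw [List.drop_eq_getElem_cons hjc]
          congr 1
          have h1 := List.getElem?_eq_getElem hjc
          rw [hchj] at h1
          exact (Option.some_inj.mp h1).symm
        have hnotesc : ¬ ('!' :: t).isPrefixOf (chj :: List.drop (j + 1) c) = true := by
          intro hcon
          have hcon' := List.isPrefixOf_iff_prefix.mp hcon
          rw [← hdropj] at hcon'
          obtain ⟨t0, t', rfl⟩ : ∃ t0 t', t = t0 :: t' := by
            cases t with
            | nil => exact absurd rfl ht
            | cons a b => exact ⟨a, b, rfl⟩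
          exact hb (heads_eq_of_prefix hpre hcon' ▸ List.mem_cons_self)
        have hyes : t.isPrefixOf (chj :: List.drop (j + 1) c) = true := by
          rw [List.isPrefixOf_iff_prefix, ← hdropj]
          exact hpre
        have hRj : Rspec t (List.drop j c) = true := by
          rw [hdropj]
          simp only [Rspec, hnotesc, hyes]
          simp
        rw [hA]
        symm
        by_cases hjs : j = s
        · rw [← hjs]; exact hRj
        · -- skip to j - 1, no escape there, step to j
          have hsj1 : s + 1 ≤ j := by omega
          have hskip : Rspec t (List.drop s c) = Rspec t (List.drop (j - 1) c) := by
            have h := R_skip t (j - 1 - s) (List.drop s c) (by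
              intro j' hj'
              rw [List.drop_drop]
              exact hmin (s + j') (by omega) (by omega))
            rw [List.drop_drop, show s + (j - 1 - s) = j - 1 by omega] at h
            exact h
          have hlt : j - 1 < c.length := by omega
          obtain ⟨ch1, hch1⟩ : ∃ ch, getElem? c (j - 1) = some ch :=
            ⟨_, List.getElem?_eq_getElem hlt⟩
          have hdrop1 : List.drop (j - 1) c = ch1 :: List.drop j c := by
            rw [List.drop_eq_getElem_cons hlt, show j - 1 + 1 = j by omega]
            congr 1
            have h1 := List.getElem?_eq_getElem hlt
            rw [hch1] at h1
            exact (Option.some_inj.mp h1).symm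
          have hch1ne : ch1 ≠ '!' := by
            intro hcon
            apply hesc
            refine ⟨by omega, ?_⟩
            rw [show (j : Int) - 1 = ((j - 1 : Nat) : Int) by omega, PySem.List.pyGet?_natCast]
            rw [hch1, hcon]
          have hne1 : ¬ ('!' :: t).isPrefixOf (ch1 :: List.drop j c) = true := by
            intro hcon
            have hcon' := List.isPrefixOf_iff_prefix.mp hcon
            rw [List.cons_prefix_cons] at hcon'
            exact hch1ne hcon'.1.symm
          have hne2 : ¬ t.isPrefixOf (ch1 :: List.drop j c) = true := by
            intro hcon
            have hcon' := List.isPrefixOf_iff_prefix.mp hcon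
            rw [← hdrop1] at hcon'
            exact hmin (j - 1) (by omega) (by omega) hcon'
          rw [hskip, hdrop1]
          simp only [Rspec, hne1, hne2, if_neg, Bool.false_eq_true, not_false_iff]
          exact hRj
    · -- no occurrence at or after s: both sides are false
      have hidx : PySem.Chars.findFrom c t (s : Int) none = -1 := by
        rw [PySem.Chars.findFrom_natCast_eq_neg_one_iff c t s hs]
        simpa using hocc
      have hA : ckLoopA c t (s : Int) (f + 1) = false := by
        simp only [ckLoopA]
        rw [if_pos hidx]
      rw [hA]
      symm
      apply R_dead t (List.drop s c).length _ le_rfl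
      intro j hpre
      apply hocc
      exact hpre.isInfix.trans (List.drop_suffix _ _).isInfix

-- per-trigger equality for a nonempty, '!'-free, NUL-free trigger
lemma per_trigger (c t : List Char) (ht : t ≠ []) (hb : '!' ∉ t) (hn : '\x00' ∉ t) :
    ckLoopA c t 0 (c.length + 2)
      = PySem.Chars.isIn t (PySem.Chars.replace c ('!' :: t) ['\x00']) := by
  have hA : ckLoopA c t 0 (c.length + 2) = Rspec t c := by
    have := A_eq_R c t ht hb c.length 0 (c.length + 2) (by omega) (by omega) (by omega) (Or.inl rfl)
    simpa using this
  have hB : PySem.Chars.isIn t (PySem.Chars.replace c ('!' :: t) ['\x00']) = Rspec t c := by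
    rw [replace_eq]
    rw [Bool.eq_iff_iff, isIn_iff]
    exact infix_procRep t ht hb hn c.length c le_rfl
  rw [hA, hB]

-- the empty trigger: both sides are immediately true
lemma per_trigger_nil (c : List Char) :
    ckLoopA c [] 0 (c.length + 2)
      = PySem.Chars.isIn [] (PySem.Chars.replace c ('!' :: []) ['\x00']) := by
  rw [PySem.Chars.isIn_nil]
  show ckLoopA c [] 0 (c.length + 1 + 1) = true
  simp only [ckLoopA, PySem.Chars.findFrom_zero, PySem.Chars.find_nil]
  norm_num

-- if '!' + t never occurs in the content, the mask is the identity
lemma procRep_id (t : List Char) : ∀ (n : Nat) (l : List Char), l.length ≤ n →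
    ¬ ('!' :: t) <:+: l → procRep t l = l := by
  intro n
  induction n with
  | zero =>
    intro l h _
    have : l = [] := List.length_eq_zero_iff.mp (Nat.le_zero.mp h)
    subst this; simp [procRep]
  | succ n ih =>
    intro l h hni
    cases l with
    | nil => simp [procRep]
    | cons ch l =>
      simp only [List.length_cons, Nat.add_le_add_iff_right] at h
      have hp : ¬ ('!' :: t).isPrefixOf (ch :: l) = true := by
        intro hcon
        exact hni (List.isPrefixOf_iff_prefix.mp hcon).isInfix
      simp only [procRep, hp, if_neg, Bool.false_eq_true, not_false_iff]
      rw [ih l h (fun hm => hni (hm.trans (List.suffix_cons ch l).isInfix))]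

-- per-trigger equality when '!' + t never occurs in the content: no escape can fire
-- and both sides reduce to a plain substring test
lemma per_trigger_noesc (c t : List Char) (hc : ¬ ('!' :: t) <:+: c) :
    ckLoopA c t 0 (c.length + 2)
      = PySem.Chars.isIn t (PySem.Chars.replace c ('!' :: t) ['\x00']) := by
  rw [replace_eq, procRep_id t c.length c le_rfl hc]
  obtain ⟨f, hf⟩ : ∃ f, c.length + 2 = f + 1 := ⟨c.length + 1, rfl⟩
  rw [hf]
  simp only [ckLoopA, PySem.Chars.findFrom_zero]
  by_cases hfind : PySem.Chars.find c t = -1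
  · rw [if_pos hfind]
    symm
    simp [PySem.Chars.isIn, hfind]
  · rw [if_neg hfind]
    have hnn : 0 ≤ PySem.Chars.find c t := by
      have := PySem.Chars.neg_one_le_find (s := c) (sub := t)
      omega
    obtain ⟨hpre, -⟩ := PySem.Chars.find_spec (s := c) (sub := t) hnn
    have hlen : PySem.Chars.find c t ≤ c.length := PySem.Chars.find_le_length c t
    have hesc : ¬ (0 < PySem.Chars.find c t ∧
        PySem.List.pyGet? c (PySem.Chars.find c t - 1) = some '!') := by
      rintro ⟨h0, hg⟩
      set j := (PySem.Chars.find c t).toNat with hjdef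
      have hj1 : 1 ≤ j := by omega
      have hlt : j - 1 < c.length := by omega
      rw [show PySem.Chars.find c t - 1 = ((j - 1 : Nat) : Int) by omega,
        PySem.List.pyGet?_natCast] at hg
      have hdrop1 : List.drop (j - 1) c = '!' :: List.drop j c := by
        rw [List.drop_eq_getElem_cons hlt, show j - 1 + 1 = j by omega]
        congr 1
        have h1 := List.getElem?_eq_getElem hlt
        rw [hg] at h1
        exact (Option.some_inj.mp h1).symm
      apply hc
      have hpref : ('!' :: t) <+: List.drop (j - 1) c := by
        rw [hdrop1]
        exact List.cons_prefix_cons.mpr ⟨rfl, hpre⟩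
      exact hpref.isInfix.trans (List.drop_suffix _ _).isInfix
    rw [if_neg hesc]
    symm
    simp [PySem.Chars.isIn, hfind]

lemma pv_any_ext {α : Type} (l : List α) (p q : α → Bool) (h : ∀ x ∈ l, p x = q x) :
    l.any p = l.any q := by
  induction l with
  | nil => rfl
  | cons x xs ih =>
    simp only [List.any_cons, h x (List.mem_cons_self), ih (fun y hy => h y (List.mem_cons_of_mem x hy))]

-- ===== VERDICT (by name: the statement is the Claim_ definition above) =====
theorem check_keyword_trigger_spec : Claim_equal_check_keyword_trigger := by
  intro content triggers hdom hpre
  unfold Spec_check_keyword_trigger check_keyword_trigger check_keyword_trigger_alt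
  apply pv_any_ext
  intro tr htr
  have hn : '\x00' ∉ tr.toList := by
    unfold Dom_check_keyword_trigger at hdom
    rw [Bool.and_eq_true] at hdom
    have hstr := List.all_eq_true.mp hdom.2 tr htr
    unfold pvDomStr at hstr
    intro hmem
    have hc := List.all_eq_true.mp hstr '\x00' hmem
    simp [pvDomChar] at hc
  rcases hpre tr htr with hb | hnoesc
  · by_cases hnil : tr.toList = []
    · rw [hnil]
      exact per_trigger_nil _
    · exact per_trigger _ tr.toList hnil hb hn
  · exact per_trigger_noesc _ tr.toList hnoesc
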